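-- pv_equiv track=rewrite | github.com/austinschwartz/Competitive-Programming | codeforces/0260A_-_Adding_Digits/main.py | f
-- ===== SOURCE A (Python) =====
-- def f(a, b, n):
--     for i in range(0, 10):
--         new_num = a * 10 + i
--         if new_num % b == 0:
--             a = new_num
--             break
--     a *= (10 ** (n - 1))
--     if a % b == 0:
--         return a
--     return -1
-- ===== SOURCE B (Python) =====
-- def f(a, b, n):
--     # Closed-form digit choice instead of scanning 0..9:
--     # the smallest non-negative i with (a*10 + i) % b == 0 is (-10*a) % abs(b).
--     m = abs(b)
--     i = (-10 * a) % m
--     if i <= 9: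
--         a = 10 * a + i
--     a *= 10 ** (n - 1)
--     return a if a % b == 0 else -1
-- ===== Notes on version B (the rewrite author's own statement) =====
-- stated objective: simpler
-- what changed: The 0..9 digit search loop is replaced by a direct modular computation: the needed digit is (-10*a) % abs(b), appended when it is at most 9.
-- outside the precondition, e.g. on f(1, 0, 2): A raises ZeroDivisionError, B raises ZeroDivisionError; on f(0, 1, 0): A returns 0.0, B returns 0.0; on f(1, 7, 0): A returns -1, B returns -1
import Mathlib
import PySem

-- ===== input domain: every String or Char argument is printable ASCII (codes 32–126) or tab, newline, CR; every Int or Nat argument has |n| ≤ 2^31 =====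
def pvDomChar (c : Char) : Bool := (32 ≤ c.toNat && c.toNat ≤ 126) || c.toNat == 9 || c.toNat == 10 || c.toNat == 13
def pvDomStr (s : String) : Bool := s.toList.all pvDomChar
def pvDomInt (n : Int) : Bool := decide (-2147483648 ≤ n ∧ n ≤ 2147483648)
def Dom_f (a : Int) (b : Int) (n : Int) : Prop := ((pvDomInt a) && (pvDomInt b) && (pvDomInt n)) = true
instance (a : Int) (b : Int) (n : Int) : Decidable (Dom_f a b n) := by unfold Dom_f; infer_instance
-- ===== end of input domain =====

-- B replaces A's 0..9 digit-search loop by a closed-form modular computation of the digit (objective: simpler).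

-- ===== PORT A =====
-- the 'for i in range(0,10): ... break' loop: first i with (a*10+i) % b == 0 updates a
def fLoop (a : Int) (b : Int) : List Int → Int
  | [] => a
  | i :: rest => if PySem.Int.mod (a * 10 + i) b = 0 then a * 10 + i else fLoop a b rest

def f (a : Int) (b : Int) (n : Int) : Int :=
  let a1 := fLoop a b (PySem.List.pyRange 0 10 1)
  let a2 := a1 * 10 ^ (n - 1).toNat
  if PySem.Int.mod a2 b = 0 then a2 else -1

-- ===== PORT B =====
def f_alt (a : Int) (b : Int) (n : Int) : Int :=
  let m : Int := b.natAbs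
  let i := PySem.Int.mod (-10 * a) m
  let a1 := if i ≤ 9 then 10 * a + i else a
  let a2 := a1 * 10 ^ (n - 1).toNat
  if PySem.Int.mod a2 b = 0 then a2 else -1

-- ===== PRECONDITION & SPEC =====
-- Pre_ excludes b = 0, where A raises ZeroDivisionError, and n < 1, where 10**(n-1)
-- is a float so A's result is computed in floating point (e.g. 0.0), leaving the integer domain.
def Pre_f (a : Int) (b : Int) (n : Int) : Prop := b ≠ 0 ∧ 1 ≤ n
instance (a : Int) (b : Int) (n : Int) : Decidable (Pre_f a b n) := by unfold Pre_f; infer_instance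
def pvWitness_f : Int × Int × Int := (10, 5, 2)

def Spec_f (a : Int) (b : Int) (n : Int) (out : Int) : Prop := out = f_alt a b n
instance (a : Int) (b : Int) (n : Int) (out : Int) : Decidable (Spec_f a b n out) := by unfold Spec_f; infer_instance

-- ===== CLAIM (what is proved, stated in full; the proofs are below) =====
def Claim_equal_f : Prop := ∀ (a : Int) (b : Int) (n : Int), Dom_f a b n → Pre_f a b n → Spec_f a b n (f a b n)

-- ===== LEMMAS AND PROOFS =====

-- A's loop condition is divisibility by |b|, i.e. a congruence on the digit
theorem fCond_iff (a b : Int) (i : Int) :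
    (PySem.Int.mod (a * 10 + i) b = 0) ↔ i % (b.natAbs:Int) = (-10 * a) % (b.natAbs:Int) := by
  rw [PySem.Int.mod_eq_zero_iff_dvd, Int.emod_eq_emod_iff_emod_sub_eq_zero,
      show i - -10 * a = a * 10 + i by ring, ← Int.natAbs_dvd (a := b)]
  exact Int.dvd_iff_emod_eq_zero

theorem fLoop_skip (a b : Int) (l1 l2 : List Int)
    (h : ∀ i ∈ l1, ¬ PySem.Int.mod (a * 10 + i) b = 0) :
    fLoop a b (l1 ++ l2) = fLoop a b l2 := by
  induction l1 with
  | nil => rfl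
  | cons x t ih =>
      simp only [List.cons_append, fLoop, if_neg (h x (by simp))]
      exact ih (fun i hi => h i (by simp [hi]))

theorem fLoop_none (a b : Int) (l : List Int)
    (h : ∀ i ∈ l, ¬ PySem.Int.mod (a * 10 + i) b = 0) :
    fLoop a b l = a := by
  induction l with
  | nil => rfl
  | cons x t ih =>
      simp only [fLoop, if_neg (h x (by simp))]
      exact ih (fun i hi => h i (by simp [hi]))

theorem fLoop_eq (a b : Int) (hb : b ≠ 0) :
    fLoop a b (PySem.List.pyRange 0 10 1) =
      (if PySem.Int.mod (-10 * a) (b.natAbs : Int) ≤ 9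
       then 10 * a + PySem.Int.mod (-10 * a) (b.natAbs : Int) else a) := by
  have hm : (0 : Int) < (b.natAbs : Int) := by
    have := Int.natAbs_pos.mpr hb; exact_mod_cast this
  have hmod : PySem.Int.mod (-10 * a) (b.natAbs : Int) = (-10 * a) % (b.natAbs:Int) :=
    PySem.Int.mod_eq_emod_of_pos hm
  have hlist : PySem.List.pyRange 0 10 1 = [0,1,2,3,4,5,6,7,8,9] := by decide
  rw [hmod, hlist]
  generalize hJ : (-10 * a) % (b.natAbs : Int) = jv
  have hj0 : 0 ≤ jv := hJ ▸ Int.emod_nonneg _ (by omega)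
  have hjm : jv < (b.natAbs : Int) := hJ ▸ Int.emod_lt_of_pos _ hm
  have hchar : ∀ i : Int, (PySem.Int.mod (a * 10 + i) b = 0) ↔ i % (b.natAbs:Int) = jv := by
    intro i; rw [fCond_iff, hJ]
  have hlt : ∀ i : Int, 0 ≤ i → i < jv → ¬ PySem.Int.mod (a * 10 + i) b = 0 := by
    intro i h0 hij
    rw [hchar, Int.emod_eq_of_lt h0 (by omega)]
    omega
  by_cases hj9 : jv ≤ 9
  · rw [if_pos hj9]
    have hhit : ∀ k : Int, k = jv → PySem.Int.mod (a * 10 + k) b = 0 := by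
      intro k hk; rw [hchar, hk, Int.emod_eq_of_lt hj0 hjm]
    interval_cases jv
    · simp only [fLoop, if_pos (hhit 0 rfl)]; ring
    · show fLoop a b ([0] ++ [1,2,3,4,5,6,7,8,9]) = 10 * a + 1
      rw [fLoop_skip a b _ _ (by intro i hi; apply hlt i <;> simp at hi <;> omega)]
      simp only [fLoop, if_pos (hhit 1 rfl)]; ring
    · show fLoop a b ([0,1] ++ [2,3,4,5,6,7,8,9]) = 10 * a + 2
      rw [fLoop_skip a b _ _ (by intro i hi; apply hlt i <;> simp at hi <;> omega)]
      simp only [fLoop, if_pos (hhit 2 rfl)]; ring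
    · show fLoop a b ([0,1,2] ++ [3,4,5,6,7,8,9]) = 10 * a + 3
      rw [fLoop_skip a b _ _ (by intro i hi; apply hlt i <;> simp at hi <;> omega)]
      simp only [fLoop, if_pos (hhit 3 rfl)]; ring
    · show fLoop a b ([0,1,2,3] ++ [4,5,6,7,8,9]) = 10 * a + 4
      rw [fLoop_skip a b _ _ (by intro i hi; apply hlt i <;> simp at hi <;> omega)]
      simp only [fLoop, if_pos (hhit 4 rfl)]; ring
    · show fLoop a b ([0,1,2,3,4] ++ [5,6,7,8,9]) = 10 * a + 5
      rw [fLoop_skip a b _ _ (by intro i hi; apply hlt i <;> simp at hi <;> omega)]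
      simp only [fLoop, if_pos (hhit 5 rfl)]; ring
    · show fLoop a b ([0,1,2,3,4,5] ++ [6,7,8,9]) = 10 * a + 6
      rw [fLoop_skip a b _ _ (by intro i hi; apply hlt i <;> simp at hi <;> omega)]
      simp only [fLoop, if_pos (hhit 6 rfl)]; ring
    · show fLoop a b ([0,1,2,3,4,5,6] ++ [7,8,9]) = 10 * a + 7
      rw [fLoop_skip a b _ _ (by intro i hi; apply hlt i <;> simp at hi <;> omega)]
      simp only [fLoop, if_pos (hhit 7 rfl)]; ring
    · show fLoop a b ([0,1,2,3,4,5,6,7] ++ [8,9]) = 10 * a + 8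
      rw [fLoop_skip a b _ _ (by intro i hi; apply hlt i <;> simp at hi <;> omega)]
      simp only [fLoop, if_pos (hhit 8 rfl)]; ring
    · show fLoop a b ([0,1,2,3,4,5,6,7,8] ++ [9]) = 10 * a + 9
      rw [fLoop_skip a b _ _ (by intro i hi; apply hlt i <;> simp at hi <;> omega)]
      simp only [fLoop, if_pos (hhit 9 rfl)]; ring
  · rw [if_neg hj9]
    exact fLoop_none a b _ (by intro i hi; apply hlt i <;> simp at hi <;> omega)

-- ===== VERDICT (by name: the statement is the Claim_ definition above) =====
theorem f_spec : Claim_equal_f := by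
  intro a b n _ hpre
  obtain ⟨hb, -⟩ := hpre
  show f a b n = f_alt a b n
  simp only [f, f_alt, fLoop_eq a b hb]
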